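-- pv_equiv track=rewrite | github.com/samihsq/slm-agentic-benchmarking | src/benchmarks/skills/instruction_following/matrix_instruction_following.py | L26_block_sum
-- ===== SOURCE A (Python) =====
-- def L26_block_sum(M):
--     h,w=len(M),len(M[0])
--     out=[]
--     for i in range(0,h,2):
--         row=[]
--         for j in range(0,w,2):
--             s=0
--             for di in [0,1]:
--                 for dj in [0,1]:
--                     if i+di<h and j+dj<w:
--                         s+=M[i+di][j+dj]
--             row.append(s)
--         out.append(row)
--     return out
-- ===== SOURCE B (Python) =====
-- def L26_block_sum(M):
--     w = len(M[0])
--     rows = [[sum(r[j:j+2]) for j in range(0, w, 2)] for r in (row[:w] for row in M)]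
--     h = len(rows)
--     out = []
--     for i in range(0, h, 2):
--         if i + 1 < h:
--             out.append([a + b for a, b in zip(rows[i], rows[i + 1])])
--         else:
--             out.append(rows[i])
--     return out
-- ===== Notes on version B (the rewrite author's own statement) =====
-- stated objective: alternative
-- what changed: Replaces the per-block 4-way gather (triple nested loop with bounds guards) by a two-phase reduction: first collapse adjacent column pairs within each (truncated) row, then sum adjacent row pairs with zip.
import Mathlib
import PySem

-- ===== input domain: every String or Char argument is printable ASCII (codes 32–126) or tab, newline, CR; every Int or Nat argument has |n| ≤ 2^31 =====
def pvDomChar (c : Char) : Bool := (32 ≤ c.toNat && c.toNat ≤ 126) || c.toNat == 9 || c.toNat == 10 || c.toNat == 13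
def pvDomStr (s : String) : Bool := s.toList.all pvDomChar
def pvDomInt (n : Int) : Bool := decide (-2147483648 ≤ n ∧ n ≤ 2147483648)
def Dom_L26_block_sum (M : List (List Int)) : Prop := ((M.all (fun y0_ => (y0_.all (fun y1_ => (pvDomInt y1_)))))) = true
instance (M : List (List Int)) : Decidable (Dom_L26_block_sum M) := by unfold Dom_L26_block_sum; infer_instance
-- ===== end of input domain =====

-- B replaces A's per-block 4-way gather (guarded triple nested loop) by a two-phase reduction
-- (collapse column pairs within each row, then sum adjacent row pairs); same cost, different decomposition.

-- ===== PORT A =====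
def L26_block_sum (M : List (List Int)) : List (List Int) :=
  let h : Int := M.length
  let w : Int := (PySem.List.pyGetD M 0 []).length
  (PySem.List.pyRange 0 h 2).foldl (fun out i =>
    let row := (PySem.List.pyRange 0 w 2).foldl (fun row j =>
      let s := ([0, 1] : List Int).foldl (fun s di =>
        ([0, 1] : List Int).foldl (fun s dj =>
          if i + di < h ∧ j + dj < w then
            s + PySem.List.pyGetD (PySem.List.pyGetD M (i + di) []) (j + dj) 0
          else s) s) 0
      row ++ [s]) []
    out ++ [row]) []

-- ===== PORT B =====
def L26_block_sum_alt (M : List (List Int)) : List (List Int) :=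
  let w : Int := (PySem.List.pyGetD M 0 []).length
  let rows := M.map (fun row =>
    (PySem.List.pyRange 0 w 2).map (fun j =>
      (PySem.List.slice (PySem.List.slice row none (some w)) (some j) (some (j + 2))).sum))
  let h : Int := rows.length
  (PySem.List.pyRange 0 h 2).foldl (fun out i =>
    if i + 1 < h then
      out ++ [List.zipWith (· + ·) (PySem.List.pyGetD rows i []) (PySem.List.pyGetD rows (i + 1) [])]
    else
      out ++ [PySem.List.pyGetD rows i []]) []

-- ===== PRECONDITION & SPEC =====
-- Pre_ excludes exactly the inputs where A raises IndexError: the empty matrix (M[0]),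
-- and matrices with some row shorter than the first row (M[i+di][j+dj] out of range).
def Pre_L26_block_sum (M : List (List Int)) : Prop :=
  M ≠ [] ∧ ∀ r ∈ M, (M.headD []).length ≤ r.length
instance (M : List (List Int)) : Decidable (Pre_L26_block_sum M) := by
  unfold Pre_L26_block_sum; infer_instance
def pvWitness_L26_block_sum : List (List Int) := [[1, 2, 3], [4, 5, 6], [7, 8, 9]]

def Spec_L26_block_sum (M : List (List Int)) (out : List (List Int)) : Prop := out = L26_block_sum_alt M
instance (M : List (List Int)) (out : List (List Int)) : Decidable (Spec_L26_block_sum M out) := by unfold Spec_L26_block_sum; infer_instance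

-- ===== CLAIM (what is proved, stated in full; the proofs are below) =====
def Claim_equal_L26_block_sum : Prop := ∀ (M : List (List Int)), Dom_L26_block_sum M → Pre_L26_block_sum M → Spec_L26_block_sum M (L26_block_sum M)

-- ===== LEMMAS AND PROOFS =====

-- A's inner 2x2 gather, written out (h w : the Int bounds A computes).
def pvCellA (M : List (List Int)) (h w i j : Int) : Int :=
  (if i < h ∧ j < w then PySem.List.pyGetD (PySem.List.pyGetD M i []) j 0 else 0)
  + (if i < h ∧ j + 1 < w then PySem.List.pyGetD (PySem.List.pyGetD M i []) (j + 1) 0 else 0)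
  + (if i + 1 < h ∧ j < w then PySem.List.pyGetD (PySem.List.pyGetD M (i + 1) []) j 0 else 0)
  + (if i + 1 < h ∧ j + 1 < w then PySem.List.pyGetD (PySem.List.pyGetD M (i + 1) []) (j + 1) 0 else 0)

-- B's per-row column-pair reduction, named for the proofs.
def pvRowFn (w : Int) (row : List Int) : List Int :=
  (PySem.List.pyRange 0 w 2).map (fun j =>
    (PySem.List.slice (PySem.List.slice row none (some w)) (some j) (some (j + 2))).sum)

lemma A_eq_map (M : List (List Int)) :
    L26_block_sum M = (PySem.List.pyRange 0 (M.length : Int) 2).map (fun i =>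
      (PySem.List.pyRange 0 ((PySem.List.pyGetD M 0 []).length : Int) 2).map (fun j =>
        pvCellA M (M.length : Int) ((PySem.List.pyGetD M 0 []).length : Int) i j)) := by
  unfold L26_block_sum pvCellA
  simp only [PySem.List.foldl_append_singleton_eq_map, List.nil_append, List.foldl_cons,
    List.foldl_nil]
  apply List.map_congr_left; intro i _; apply List.map_congr_left; intro j _
  simp only [add_zero, zero_add]
  split_ifs <;> omega

lemma B_eq_map (M : List (List Int)) :
    L26_block_sum_alt M = (PySem.List.pyRange 0 (M.length : Int) 2).map (fun i =>
      if i + 1 < (M.length : Int) then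
        List.zipWith (· + ·)
          (PySem.List.pyGetD (M.map (pvRowFn ((PySem.List.pyGetD M 0 []).length : Int))) i [])
          (PySem.List.pyGetD (M.map (pvRowFn ((PySem.List.pyGetD M 0 []).length : Int))) (i + 1) [])
      else PySem.List.pyGetD (M.map (pvRowFn ((PySem.List.pyGetD M 0 []).length : Int))) i []) := by
  unfold L26_block_sum_alt pvRowFn
  simp only [List.length_map]
  have hbody : ∀ (rows : List (List Int)) (hI : Int),
      (PySem.List.pyRange 0 hI 2).foldl (fun out i =>
        if i + 1 < hI then
          out ++ [List.zipWith (· + ·) (PySem.List.pyGetD rows i []) (PySem.List.pyGetD rows (i + 1) [])]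
        else out ++ [PySem.List.pyGetD rows i []]) []
      = (PySem.List.pyRange 0 hI 2).map (fun i =>
          if i + 1 < hI then
            List.zipWith (· + ·) (PySem.List.pyGetD rows i []) (PySem.List.pyGetD rows (i + 1) [])
          else PySem.List.pyGetD rows i []) := by
    intro rows hI
    have h1 : (fun (out : List (List Int)) i =>
        if i + 1 < hI then
          out ++ [List.zipWith (· + ·) (PySem.List.pyGetD rows i []) (PySem.List.pyGetD rows (i + 1) [])]
        else out ++ [PySem.List.pyGetD rows i []])
      = fun out i => out ++ [if i + 1 < hI then
          List.zipWith (· + ·) (PySem.List.pyGetD rows i []) (PySem.List.pyGetD rows (i + 1) [])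
        else PySem.List.pyGetD rows i []] := by
      funext out i; split <;> rfl
    rw [h1, PySem.List.foldl_append_singleton_eq_map, List.nil_append]
  exact hbody _ _

-- B's cell value: the sum of a 2-slice of the w-truncated row (w ≤ r.length, m < w).
lemma cellB_sum (r : List Int) (w m : Nat) (hw : w ≤ r.length) (hm : m < w) :
    (PySem.List.slice (PySem.List.slice r none (some (w:Int))) (some (m:Int)) (some ((m:Int) + 2))).sum
      = PySem.List.pyGetD r (m:Int) 0 + (if (m:Int) + 1 < (w:Int) then PySem.List.pyGetD r ((m:Int)+1) 0 else 0) := by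
  have h2 : ((m:Int) + 2) = ((m+2 : Nat) : Int) := by push_cast; ring
  have hlt : (m:Int) + 1 = ((m+1:Nat):Int) := by push_cast; ring
  rw [PySem.List.slice_to r (by positivity), Int.toNat_natCast, h2, hlt, PySem.List.slice_natCast]
  have hcond : (((m+1:Nat):Int) < (w:Int)) ↔ (m+1 < w) := by exact_mod_cast Iff.rfl
  simp only [PySem.List.pyGetD_natCast, hcond]
  have htw : (r.take w).length = w := by simp [hw]
  by_cases hb : m + 1 < w
  · rw [List.drop_eq_getElem_cons (by omega), List.drop_eq_getElem_cons (by omega)]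
    have e1 : (r.take w)[m]'(by omega) = r.getD m 0 := by
      rw [List.getElem_take]; rw [List.getD_eq_getElem r 0 (by omega)]
    have e2 : (r.take w)[m+1]'(by omega) = r.getD (m+1) 0 := by
      rw [List.getElem_take]; rw [List.getD_eq_getElem r 0 (by omega)]
    have ht : (m:Nat) + 2 - m = 2 := by omega
    rw [ht]
    simp [e1, e2, hb]
  · have hnil : (r.take w).drop (m+1) = [] := by
      apply List.drop_eq_nil_of_le; omega
    rw [List.drop_eq_getElem_cons (by omega), hnil]
    have e1 : (r.take w)[m]'(by omega) = r.getD m 0 := by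
      rw [List.getElem_take]; rw [List.getD_eq_getElem r 0 (by omega)]
    simp [e1, hb]

lemma rows_getD (M : List (List Int)) (w : Int) (n : Nat) (hn : n < M.length) :
    PySem.List.pyGetD (M.map (pvRowFn w)) (n : Int) [] = pvRowFn w (M.getD n []) := by
  rw [PySem.List.pyGetD_natCast, List.getD_eq_getElem _ _ (by simpa using hn),
    List.getElem_map, List.getD_eq_getElem _ _ hn]

theorem L26_main (M : List (List Int)) (hpre : Pre_L26_block_sum M) :
    L26_block_sum M = L26_block_sum_alt M := by
  obtain ⟨hne, hrows⟩ := hpre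
  have hw0 : PySem.List.pyGetD M 0 [] = M.headD [] := by
    cases M with
    | nil => rfl
    | cons a t => simp [PySem.List.pyGetD_ofNat' (a :: t) 0 []]
  rw [A_eq_map, B_eq_map]
  apply List.map_congr_left
  intro i hi
  rw [PySem.List.mem_pyRange_iff_of_pos (by norm_num)] at hi
  obtain ⟨h0, hih, _⟩ := hi
  obtain ⟨n, rfl⟩ : ∃ n : Nat, i = (n : Int) := ⟨i.toNat, (Int.toNat_of_nonneg h0).symm⟩
  have hnh : n < M.length := by exact_mod_cast hih
  set w : Nat := (PySem.List.pyGetD M 0 []).length with hwdef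
  have hwlen : ∀ (k : Nat), k < M.length → w ≤ (M.getD k []).length := by
    intro k hk
    rw [hwdef, hw0, List.getD_eq_getElem _ _ hk]
    exact hrows _ (List.getElem_mem hk)
  have rowEq : ∀ (k : Nat), k < M.length →
      pvRowFn (w : Int) (M.getD k []) = (PySem.List.pyRange 0 (w : Int) 2).map (fun j =>
        PySem.List.pyGetD (M.getD k []) j 0 +
          (if j + 1 < (w : Int) then PySem.List.pyGetD (M.getD k []) (j + 1) 0 else 0)) := by
    intro k hk
    unfold pvRowFn
    apply List.map_congr_left
    intro j hj
    rw [PySem.List.mem_pyRange_iff_of_pos (by norm_num)] at hj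
    obtain ⟨hj0, hjw, _⟩ := hj
    obtain ⟨m, rfl⟩ : ∃ m : Nat, j = (m : Int) := ⟨j.toNat, (Int.toNat_of_nonneg hj0).symm⟩
    exact cellB_sum _ _ _ (hwlen k hk) (by exact_mod_cast hjw)
  have hcast1 : ((n : Int) + 1) = ((n + 1 : Nat) : Int) := by push_cast; ring
  by_cases hc : (n : Int) + 1 < (M.length : Int)
  · have hn1 : n + 1 < M.length := by exact_mod_cast hcast1 ▸ hc
    rw [if_pos hc, rows_getD _ _ n hnh, hcast1, rows_getD _ _ (n+1) hn1,
      rowEq n hnh, rowEq (n+1) hn1, List.zipWith_map, List.zipWith_self]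
    apply List.map_congr_left
    intro j hj
    rw [PySem.List.mem_pyRange_iff_of_pos (by norm_num)] at hj
    obtain ⟨hj0, hjw, _⟩ := hj
    unfold pvCellA
    rw [PySem.List.pyGetD_natCast M n [], hcast1, PySem.List.pyGetD_natCast M (n+1) []]
    rw [← hcast1]
    split_ifs <;> omega
  · have hn1 : ¬ (n + 1 < M.length) := by
      intro hcon; exact hc (by exact_mod_cast hcast1 ▸ (by exact_mod_cast hcon : ((n+1:Nat):Int) < (M.length:Int)))
    rw [if_neg hc, rows_getD _ _ n hnh, rowEq n hnh]
    apply List.map_congr_left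
    intro j hj
    rw [PySem.List.mem_pyRange_iff_of_pos (by norm_num)] at hj
    obtain ⟨hj0, hjw, _⟩ := hj
    unfold pvCellA
    rw [PySem.List.pyGetD_natCast M n []]
    split_ifs <;> omega

-- ===== VERDICT (by name: the statement is the Claim_ definition above) =====
theorem L26_block_sum_spec : Claim_equal_L26_block_sum := by
  intro M _ hpre
  unfold Spec_L26_block_sum
  exact L26_main M hpre
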